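-- pv_equiv track=rewrite | github.com/lcrvl2/outbound-workflows | competitor-followers/scripts/find_personas.py | get_seniority_priority
-- ===== SOURCE A (Python) =====
-- SENIORITY_PRIORITY = {
--     'cmo': 1,
--     'chief marketing officer': 1,
--     'vp': 2,
--     'vice president': 2,
--     'head of': 3,
--     'director': 4,
--     'manager': 5,
--     'lead': 6,
--     'strategist': 6,
--     'coordinator': 7,
--     'specialist': 8,
-- }
--
-- def get_seniority_priority(title):
--     """Get seniority priority score for a title (lower = higher seniority)"""
--     if not title:
--         return 999
--
--     title_lower = title.lower()
--
--     for keyword, priority in SENIORITY_PRIORITY.items():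
--         if keyword in title_lower:
--             return priority
--
--     return 999  # Unknown seniority
-- ===== SOURCE B (Python) =====
-- SENIORITY_PRIORITY = {
--     'cmo': 1,
--     'chief marketing officer': 1,
--     'vp': 2,
--     'vice president': 2,
--     'head of': 3,
--     'director': 4,
--     'manager': 5,
--     'lead': 6,
--     'strategist': 6,
--     'coordinator': 7,
--     'specialist': 8,
-- }
--
-- def get_seniority_priority(title):
--     """Get seniority priority score for a title (lower = higher seniority)"""
--     if not title:
--         return 999
--     title_lower = title.lower()
--     return min((priority for keyword, priority in SENIORITY_PRIORITY.items()
--                 if keyword in title_lower), default=999)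
-- ===== Notes on version B (the rewrite author's own statement) =====
-- stated objective: alternative
-- what changed: Replaced the early-return first-match loop by a full scan that aggregates the matching priorities with min(..., default=999); equivalent because the dict's priorities are non-decreasing in insertion order, so the first match is the minimum.
import Mathlib
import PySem

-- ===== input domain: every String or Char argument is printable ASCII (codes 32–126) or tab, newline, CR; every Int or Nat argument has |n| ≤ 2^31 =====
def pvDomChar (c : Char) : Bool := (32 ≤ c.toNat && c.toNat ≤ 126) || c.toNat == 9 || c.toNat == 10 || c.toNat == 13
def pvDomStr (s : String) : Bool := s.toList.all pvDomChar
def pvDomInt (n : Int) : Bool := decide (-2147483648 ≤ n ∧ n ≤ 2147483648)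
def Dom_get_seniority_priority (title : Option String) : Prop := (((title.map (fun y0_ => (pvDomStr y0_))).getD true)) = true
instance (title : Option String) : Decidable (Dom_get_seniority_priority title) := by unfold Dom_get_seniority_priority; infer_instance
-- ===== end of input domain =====

-- B replaces A's first-match early-return loop by min-aggregation over all matching
-- priorities (equivalent since the table's priorities are non-decreasing); objective: alternative.

-- the module-level SENIORITY_PRIORITY dict, used by both programs (association list in insertion order)
def SENIORITY_PRIORITY : List (String × Int) :=
  [("cmo", 1), ("chief marketing officer", 1), ("vp", 2), ("vice president", 2),
   ("head of", 3), ("director", 4), ("manager", 5), ("lead", 6), ("strategist", 6),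
   ("coordinator", 7), ("specialist", 8)]

-- ===== PORT A =====
-- A's for-loop with early return on the first matching keyword
def prioLoopA (tl : String) : List (String × Int) → Int
  | [] => 999
  | (keyword, priority) :: rest =>
      if PySem.Str.isIn keyword tl then priority else prioLoopA tl rest

def get_seniority_priority (title : Option String) : Int :=
  match title with
  | none => 999
  | some s =>
      if s = "" then 999
      else prioLoopA (PySem.Str.lower s) SENIORITY_PRIORITY

-- ===== PORT B =====
def get_seniority_priority_alt (title : Option String) : Int :=
  match title with
  | none => 999
  | some s =>
      if s = "" then 999
      else
        let title_lower := PySem.Str.lower s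
        PySem.List.minD
          ((SENIORITY_PRIORITY.filter (fun kp => PySem.Str.isIn kp.1 title_lower)).map (·.2))
          (fun x => x) 999

-- ===== PRECONDITION & SPEC =====
def Spec_get_seniority_priority (title : Option String) (out : Int) : Prop := out = get_seniority_priority_alt title
instance (title : Option String) (out : Int) : Decidable (Spec_get_seniority_priority title out) := by unfold Spec_get_seniority_priority; infer_instance

-- ===== CLAIM (what is proved, stated in full; the proofs are below) =====
def Claim_equal_get_seniority_priority : Prop := ∀ (title : Option String), Dom_get_seniority_priority title → Spec_get_seniority_priority title (get_seniority_priority title)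

-- ===== LEMMAS AND PROOFS =====

-- folding min over a list that is pointwise ≥ p leaves p
lemma foldl_min_of_le (p : Int) (ys : List Int) (h : ∀ y ∈ ys, p ≤ y) :
    ys.foldl min p = p := by
  induction ys with
  | nil => rfl
  | cons y t ih =>
      simp only [List.foldl_cons]
      have hp : min p y = p := min_eq_left (h y (List.mem_cons_self))
      rw [hp]
      exact ih (fun z hz => h z (List.mem_cons_of_mem _ hz))

-- first match = min of all matches, provided priorities are non-decreasing in list order
lemma loop_eq_minD (tl : String) (l : List (String × Int))
    (hsorted : l.Pairwise (fun a b => a.2 ≤ b.2)) :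
    prioLoopA tl l =
      PySem.List.minD ((l.filter (fun kp => PySem.Str.isIn kp.1 tl)).map (·.2)) (fun x => x) 999 := by
  induction l with
  | nil => rfl
  | cons hd t ih =>
      obtain ⟨k, p⟩ := hd
      rw [List.pairwise_cons] at hsorted
      by_cases hm : PySem.Str.isIn k tl
      · simp only [prioLoopA, if_true, List.filter_cons, hm, List.map_cons]
        rw [PySem.List.minD, PySem.List.min?_id_cons, Option.getD_some]
        refine (foldl_min_of_le p _ ?_).symm
        intro y hy
        simp only [List.mem_map, List.mem_filter] at hy
        obtain ⟨q, ⟨hq, _⟩, rfl⟩ := hy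
        exact hsorted.1 q hq
      · simp only [prioLoopA, List.filter_cons, hm]
        exact ih hsorted.2

-- ===== VERDICT (by name: the statement is the Claim_ definition above) =====
theorem get_seniority_priority_spec : Claim_equal_get_seniority_priority := by
  intro title _
  unfold Spec_get_seniority_priority get_seniority_priority get_seniority_priority_alt
  match title with
  | none => rfl
  | some s =>
      by_cases hs : s = ""
      · simp [hs]
      · simp only [hs, if_false]
        exact loop_eq_minD (PySem.Str.lower s) SENIORITY_PRIORITY (by decide)
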